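-- pv_equiv track=rewrite | github.com/ajittgosavii/awswar | ai_lens_module.py | calculate_pillar_scores
-- ===== SOURCE A (Python) =====
-- from typing import Dict, List, Optional, Any, Tuple
--
-- def calculate_pillar_scores(responses: Dict) -> Dict[str, Dict]:
--     """Calculate scores grouped by WAF pillar"""
--     pillars = {}
--
--     for r in responses.values():
--         pillar = r.get("pillar", "Unknown")
--         if pillar not in pillars:
--             pillars[pillar] = {"total": 0, "points": 0, "answered": 0}
--
--         pillars[pillar]["answered"] += 1
--         pillars[pillar]["total"] += 100
--
--         risk = r.get("risk", "HIGH_RISK")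
--         if risk == "NO_RISK":
--             pillars[pillar]["points"] += 100
--         elif risk == "MEDIUM_RISK":
--             pillars[pillar]["points"] += 50
--
--     # Calculate percentages
--     result = {}
--     for pillar, data in pillars.items():
--         if data["total"] > 0:
--             result[pillar] = {
--                 "score": int((data["points"] / data["total"]) * 100),
--                 "answered": data["answered"]
--             }
--
--     return result
-- ===== SOURCE B (Python) =====
-- def calculate_pillar_scores(responses):
--     """Two-phase rewrite: first group responses by pillar, then score each group."""
--     groups = {}
--     for r in responses.values():
--         groups.setdefault(r.get("pillar", "Unknown"), []).append(r)
--
--     result = {}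
--     for pillar, group in groups.items():
--         answered = len(group)
--         points = sum(
--             100 if r.get("risk", "HIGH_RISK") == "NO_RISK"
--             else 50 if r.get("risk", "HIGH_RISK") == "MEDIUM_RISK"
--             else 0
--             for r in group
--         )
--         result[pillar] = {
--             "score": int(points / (answered * 100) * 100),
--             "answered": answered,
--         }
--     return result
-- ===== Notes on version B (the rewrite author's own statement) =====
-- stated objective: alternative
-- what changed: B replaces A's single interleaved counter-dict pass (per-pillar total/points/answered counters updated per response, then a second percentage pass) with two distinct phases: an index dict mapping each pillar to the list of its responses, then one scoring pass over the grouped table.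
import Mathlib
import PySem

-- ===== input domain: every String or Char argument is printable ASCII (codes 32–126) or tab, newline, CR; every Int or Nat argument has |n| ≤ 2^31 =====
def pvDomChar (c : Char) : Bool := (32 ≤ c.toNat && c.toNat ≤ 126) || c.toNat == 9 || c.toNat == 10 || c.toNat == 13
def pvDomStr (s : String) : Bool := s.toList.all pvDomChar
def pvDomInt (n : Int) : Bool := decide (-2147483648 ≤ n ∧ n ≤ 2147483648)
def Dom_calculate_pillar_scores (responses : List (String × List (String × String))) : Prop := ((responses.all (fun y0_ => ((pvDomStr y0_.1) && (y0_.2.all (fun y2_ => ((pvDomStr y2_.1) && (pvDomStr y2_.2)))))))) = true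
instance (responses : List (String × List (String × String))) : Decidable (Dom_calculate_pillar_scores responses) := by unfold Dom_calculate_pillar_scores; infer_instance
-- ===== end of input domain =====

-- B replaces A's single interleaved counter-dict pass with two phases (group responses by pillar, then score each
-- group); same O(n) cost, different decomposition ("alternative").

-- shared primitive: r.get(k, dflt) on the inner dict (assoc list, first match)
def pvGet (r : List (String × String)) (k dflt : String) : String :=
  (PySem.Dict.mk r).getD k dflt

-- round-to-nearest, ties-to-even of q / t (t ≠ 0) at integer resolution
def pvRne (q t : Nat) : Nat :=
  let d := q / t
  let r := q % t
  if t < 2 * r || (2 * r == t && d % 2 == 1) then d + 1 else d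

-- exact integer emulation of Python's int((p/t)*100) for 0 ≤ p ≤ t·2^52, 0 < t:
-- p/t is rounded to a 53-bit significand (nearest, ties to even), multiplied by 100,
-- rounded again to 53 bits, then truncated toward zero — exactly IEEE-754 double arithmetic.
-- Both Source A and Source B contain this same float expression, so both ports share this helper.
def pvFloatScore (p t : Int) : Int :=
  let pn := p.toNat
  let tn := t.toNat
  if pn = 0 then 0
  else
    let need := (2 ^ 52 * tn + pn - 1) / pn
    let s := Nat.clog 2 need
    let m1 := pvRne (pn * 2 ^ s) tn
    let M := m1 * 100
    let b := Nat.log2 M + 1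
    if b ≤ 53 then ((M / 2 ^ s : Nat) : Int)
    else
      let shift := b - 53
      let dd := M / 2 ^ shift
      let r := M % 2 ^ shift
      let half := 2 ^ (shift - 1)
      let m2 := if half < r || (r == half && dd % 2 == 1) then dd + 1 else dd
      if s ≤ shift then ((m2 * 2 ^ (shift - s) : Nat) : Int)
      else ((m2 / 2 ^ (s - shift) : Nat) : Int)

-- ===== PORT A =====
-- loop body of A's first pass (one response): ensure the pillar's counters exist, then
-- answered += 1; total += 100; points += 100/50 depending on risk
def pvABody (pillars : PySem.Dict String (Int × Int × Int)) (kv : String × List (String × String)) :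
    PySem.Dict String (Int × Int × Int) :=
  let pillar := pvGet kv.2 "pillar" "Unknown"
  let pillars := if pillars.contains pillar then pillars else pillars.insert pillar ((0 : Int), (0 : Int), (0 : Int))
  let pillars := pillars.insert pillar (let v := pillars.getD pillar (0, 0, 0); (v.1, v.2.1, v.2.2 + 1))
  let pillars := pillars.insert pillar (let v := pillars.getD pillar (0, 0, 0); (v.1 + 100, v.2.1, v.2.2))
  let risk := pvGet kv.2 "risk" "HIGH_RISK"
  if risk == "NO_RISK" then
    pillars.insert pillar (let v := pillars.getD pillar (0, 0, 0); (v.1, v.2.1 + 100, v.2.2))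
  else if risk == "MEDIUM_RISK" then
    pillars.insert pillar (let v := pillars.getD pillar (0, 0, 0); (v.1, v.2.1 + 50, v.2.2))
  else pillars

-- loop body of A's second pass: if data["total"] > 0 emit {"score": …, "answered": …}
def pvAResBody (result : PySem.Dict String (List (String × Int))) (p : String × (Int × Int × Int)) :
    PySem.Dict String (List (String × Int)) :=
  if p.2.1 > 0 then
    result.insert p.1 [("score", pvFloatScore p.2.2.1 p.2.1), ("answered", p.2.2.2)]
  else result

def calculate_pillar_scores (responses : List (String × List (String × String))) : List (String × List (String × Int)) :=
  let pillars := responses.foldl pvABody PySem.Dict.empty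
  let result := pillars.items.foldl pvAResBody PySem.Dict.empty
  result.items

-- ===== PORT B =====
-- phase one body: groups.setdefault(r.get("pillar","Unknown"), []).append(r)
def pvBGroupBody (groups : PySem.Dict String (List (List (String × String)))) (kv : String × List (String × String)) :
    PySem.Dict String (List (List (String × String))) :=
  groups.modify (pvGet kv.2 "pillar" "Unknown") [] (fun g => g ++ [kv.2])

-- phase two body: answered = len(group); points = sum(...); emit the scored entry
def pvBResBody (result : PySem.Dict String (List (String × Int))) (pg : String × List (List (String × String))) :
    PySem.Dict String (List (String × Int)) :=
  let answered : Int := pg.2.length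
  let points : Int := pg.2.foldl (fun acc r =>
    acc + (if pvGet r "risk" "HIGH_RISK" == "NO_RISK" then (100 : Int)
           else if pvGet r "risk" "HIGH_RISK" == "MEDIUM_RISK" then 50 else 0)) 0
  result.insert pg.1 [("score", pvFloatScore points (answered * 100)), ("answered", answered)]

def calculate_pillar_scores_alt (responses : List (String × List (String × String))) : List (String × List (String × Int)) :=
  let groups := responses.foldl pvBGroupBody PySem.Dict.empty
  let result := groups.items.foldl pvBResBody PySem.Dict.empty
  result.items

-- ===== PRECONDITION & SPEC =====
def Spec_calculate_pillar_scores (responses : List (String × List (String × String))) (out : List (String × List (String × Int))) : Prop := out = calculate_pillar_scores_alt responses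
instance (responses : List (String × List (String × String))) (out : List (String × List (String × Int))) : Decidable (Spec_calculate_pillar_scores responses out) := by unfold Spec_calculate_pillar_scores; infer_instance

-- ===== CLAIM (what is proved, stated in full; the proofs are below) =====
def Claim_equal_calculate_pillar_scores : Prop := ∀ (responses : List (String × List (String × String))), Dom_calculate_pillar_scores responses → Spec_calculate_pillar_scores responses (calculate_pillar_scores responses)

-- ===== LEMMAS AND PROOFS =====

-- proof-side abbreviations
def pKey (kv : String × List (String × String)) : String := pvGet kv.2 "pillar" "Unknown"

def pPts (r : List (String × String)) : Int :=
  if pvGet r "risk" "HIGH_RISK" == "NO_RISK" then 100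
  else if pvGet r "risk" "HIGH_RISK" == "MEDIUM_RISK" then 50 else 0

def pSum (g : List (List (String × String))) : Int := g.foldl (fun acc r => acc + pPts r) 0

-- collapsed form of A's first-pass body: one insert of the updated triple
def pvIStep (d : PySem.Dict String (Int × Int × Int)) (kv : String × List (String × String)) :
    PySem.Dict String (Int × Int × Int) :=
  d.insert (pKey kv)
    ((d.getD (pKey kv) (0, 0, 0)).1 + 100,
     (d.getD (pKey kv) (0, 0, 0)).2.1 + pPts kv.2,
     (d.getD (pKey kv) (0, 0, 0)).2.2 + 1)

lemma pvABody_eq (d : PySem.Dict String (Int × Int × Int)) (kv : String × List (String × String)) :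
    pvABody d kv = pvIStep d kv := by
  unfold pvABody pvIStep pKey pPts
  by_cases hc : d.contains (pvGet kv.2 "pillar" "Unknown") = true
  · simp only [hc, if_true, PySem.Dict.getD_insert_self, PySem.Dict.insert_insert_self]
    split_ifs <;> simp
  · have hc' : d.contains (pvGet kv.2 "pillar" "Unknown") = false := by simpa using hc
    simp only [Bool.false_eq_true, if_false, PySem.Dict.getD_insert_self,
      PySem.Dict.insert_insert_self, PySem.Dict.getD_of_not_contains, hc']
    split_ifs <;> simp

lemma pSum_shift (g : List (List (String × String))) (a : Int) :
    g.foldl (fun acc r => acc + pPts r) a = a + pSum g := by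
  induction g generalizing a with
  | nil => simp [pSum]
  | cons r g ih =>
    rw [List.foldl_cons, ih]
    conv_rhs => rw [pSum, List.foldl_cons, ih]
    ring

lemma pSum_cons (r : List (String × String)) (g : List (List (String × String))) :
    pSum (r :: g) = pPts r + pSum g := by
  rw [pSum, List.foldl_cons, pSum_shift]; ring

lemma pillars_getD (l : List (String × List (String × String))) (c : String) :
    ∀ d : PySem.Dict String (Int × Int × Int),
      (l.foldl pvIStep d).getD c (0, 0, 0) =
        ((d.getD c (0, 0, 0)).1 + 100 * ((l.filter (fun kv => pKey kv == c)).length : Int),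
         (d.getD c (0, 0, 0)).2.1 + pSum ((l.filter (fun kv => pKey kv == c)).map (·.2)),
         (d.getD c (0, 0, 0)).2.2 + ((l.filter (fun kv => pKey kv == c)).length : Int)) := by
  induction l with
  | nil => intro d; simp [pSum]
  | cons x l ih =>
    intro d
    rw [List.foldl_cons, ih]
    unfold pvIStep
    by_cases h : pKey x = c
    · subst h
      simp [PySem.Dict.getD_insert_self, pSum_cons]
      refine ⟨by ring, by ring, by ring⟩
    · have hb : (pKey x == c) = false := by simpa using h
      rw [PySem.Dict.getD_insert_of_ne]
      · simp [hb]
      · exact fun he => h he.symm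

lemma groups_getD (l : List (String × List (String × String))) (c : String) :
    ∀ d : PySem.Dict String (List (List (String × String))),
      (l.foldl pvBGroupBody d).getD c [] =
        d.getD c [] ++ (l.filter (fun kv => pKey kv == c)).map (·.2) := by
  induction l with
  | nil => intro d; simp
  | cons x l ih =>
    intro d
    rw [List.foldl_cons, ih]
    unfold pvBGroupBody
    by_cases h : pKey x = c
    · subst h
      simp [PySem.Dict.getD_modify_self, pKey]
    · have hb : (pKey x == c) = false := by simpa using h
      rw [PySem.Dict.getD_modify_of_ne]
      · simp [hb]
      · exact fun he => h he.symm

lemma pillars_keys (l : List (String × List (String × String))) :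
    (l.foldl pvIStep PySem.Dict.empty).keys = PySem.Set.ofList (l.map pKey) := by
  have h : pvIStep = fun d kv => d.insert (pKey kv)
      ((d.getD (pKey kv) (0, 0, 0)).1 + 100,
       (d.getD (pKey kv) (0, 0, 0)).2.1 + pPts kv.2,
       (d.getD (pKey kv) (0, 0, 0)).2.2 + 1) := rfl
  rw [h, PySem.Dict.keys_foldl_insert_key, PySem.Dict.keys_empty, PySem.Set.update_nil_left]

lemma groups_keys (l : List (String × List (String × String))) :
    (l.foldl pvBGroupBody PySem.Dict.empty).keys = PySem.Set.ofList (l.map pKey) := by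
  have h : pvBGroupBody = fun d kv => d.modify (pKey kv) [] (fun g => g ++ [kv.2]) := rfl
  rw [h, PySem.Dict.keys_foldl_modify_key, PySem.Dict.keys_empty, PySem.Set.update_nil_left]

lemma pillars_nodup (l : List (String × List (String × String))) :
    (l.foldl pvIStep PySem.Dict.empty).keys.Nodup := by
  have h : pvIStep = fun d kv => d.insert (pKey kv)
      ((d.getD (pKey kv) (0, 0, 0)).1 + 100,
       (d.getD (pKey kv) (0, 0, 0)).2.1 + pPts kv.2,
       (d.getD (pKey kv) (0, 0, 0)).2.2 + 1) := rfl
  rw [h]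
  exact PySem.Dict.nodup_keys_foldl_insert_key _ _ _ _ PySem.Dict.nodup_keys_empty

lemma groups_nodup (l : List (String × List (String × String))) :
    (l.foldl pvBGroupBody PySem.Dict.empty).keys.Nodup := by
  have h : pvBGroupBody = fun d kv => d.modify (pKey kv) [] (fun g => g ++ [kv.2]) := rfl
  rw [h]
  exact PySem.Dict.nodup_keys_foldl_modify_key _ _ _ _ _ PySem.Dict.nodup_keys_empty

-- generic: folding fresh-key inserts appends the mapped entries
lemma items_fold_insert {V : Type} (entry : String × V → List (String × Int)) :
    ∀ (ps : List (String × V)) (d : PySem.Dict String (List (String × Int))),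
      (∀ p ∈ ps, d.contains p.1 = false) → (ps.map (·.1)).Nodup →
      (ps.foldl (fun d p => d.insert p.1 (entry p)) d).items =
        d.items ++ ps.map (fun p => (p.1, entry p)) := by
  intro ps
  induction ps with
  | nil => intro d _ _; simp
  | cons p ps ih =>
    intro d hfresh hnd
    rw [List.foldl_cons]
    have hp : d.contains p.1 = false := hfresh p (List.mem_cons_self ..)
    have hfresh' : ∀ q ∈ ps, (d.insert p.1 (entry p)).contains q.1 = false := by
      intro q hq
      rw [PySem.Dict.contains_insert]
      have hcons : (∀ x : V, (p.1, x) ∉ ps) ∧ (ps.map (·.1)).Nodup := by simpa using hnd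
      have hne : q.1 ≠ p.1 := by
        intro he
        exact hcons.1 q.2 (by rw [← he]; simpa using hq)
      simp [hne, hfresh q (List.mem_cons_of_mem _ hq)]
    have hnd' : (ps.map (·.1)).Nodup := (by simpa using hnd : (∀ x : V, (p.1, x) ∉ ps) ∧ (ps.map (·.1)).Nodup).2
    rw [ih _ hfresh' hnd', PySem.Dict.items_insert, hp]
    simp

def pvEntryA (p : String × (Int × Int × Int)) : List (String × Int) :=
  [("score", pvFloatScore p.2.2.1 p.2.1), ("answered", p.2.2.2)]

def pvEntryB (pg : String × List (List (String × String))) : List (String × Int) :=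
  [("score", pvFloatScore (pSum pg.2) ((pg.2.length : Int) * 100)), ("answered", (pg.2.length : Int))]

lemma resA_eq : ∀ (ps : List (String × (Int × Int × Int))) (d : PySem.Dict String (List (String × Int))),
    (∀ p ∈ ps, (0 : Int) < p.2.1) →
    ps.foldl pvAResBody d = ps.foldl (fun d p => d.insert p.1 (pvEntryA p)) d := by
  intro ps
  induction ps with
  | nil => intro d _; rfl
  | cons p ps ih =>
    intro d h
    rw [List.foldl_cons, List.foldl_cons,
      show pvAResBody d p = d.insert p.1 (pvEntryA p) from by
        unfold pvAResBody pvEntryA; rw [if_pos (h p (List.mem_cons_self ..))]]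
    exact ih _ (fun q hq => h q (List.mem_cons_of_mem _ hq))

lemma bres_eq : pvBResBody = fun d pg => d.insert pg.1 (pvEntryB pg) := rfl

lemma cnt_pos (l : List (String × List (String × String))) (k : String)
    (hk : k ∈ PySem.Set.ofList (l.map pKey)) :
    0 < (l.filter (fun kv => pKey kv == k)).length := by
  rw [PySem.Set.mem_ofList] at hk
  obtain ⟨kv, hkv, hke⟩ := List.mem_map.mp hk
  exact List.length_pos_of_mem (List.mem_filter.mpr ⟨hkv, by simp [hke]⟩)

-- ===== VERDICT (by name: the statement is the Claim_ definition above) =====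
theorem calculate_pillar_scores_spec : Claim_equal_calculate_pillar_scores := by
  intro responses _
  unfold Spec_calculate_pillar_scores calculate_pillar_scores calculate_pillar_scores_alt
  have hAB : pvABody = pvIStep := funext fun d => funext fun kv => pvABody_eq d kv
  rw [hAB, bres_eq]
  dsimp only
  have hPnd := pillars_nodup responses
  have hGnd := groups_nodup responses
  have hPitems := PySem.Dict.items_eq_map_keys (responses.foldl pvIStep PySem.Dict.empty) hPnd ((0,0,0) : Int × Int × Int)
  have hGitems := PySem.Dict.items_eq_map_keys (responses.foldl pvBGroupBody PySem.Dict.empty) hGnd ([] : List (List (String × String)))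
  have hpos : ∀ p ∈ (responses.foldl pvIStep PySem.Dict.empty).items, (0 : Int) < p.2.1 := by
    intro p hp
    rw [hPitems, List.mem_map] at hp
    obtain ⟨k, hk, rfl⟩ := hp
    rw [pillars_keys] at hk
    have hc := cnt_pos responses k hk
    rw [pillars_getD]
    simp only [PySem.Dict.getD_empty]
    omega
  rw [resA_eq _ _ hpos,
    items_fold_insert pvEntryA _ _ (fun p _ => PySem.Dict.contains_empty ..)
      (by exact hPnd),
    items_fold_insert pvEntryB _ _ (fun p _ => PySem.Dict.contains_empty ..)
      (by exact hGnd),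
    hPitems, hGitems, pillars_keys, groups_keys, List.map_map, List.map_map]
  apply List.map_congr_left
  intro k hk
  simp only [Function.comp_apply]
  rw [pillars_getD, groups_getD]
  unfold pvEntryA pvEntryB
  simp only [PySem.Dict.getD_empty, List.nil_append, List.length_map, zero_add]
  rw [mul_comm]
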